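-- pv_equiv track=rewrite | github.com/mpie/MProof | backend/app/services/document_processor.py | _words_within_window
-- ===== SOURCE A (Python) =====
-- from typing import Dict, Any, List, Optional, Tuple, NamedTuple, Set
--
-- def _words_within_window(text_tokens: List[str], label_tokens: List[str], window: int = 10) -> bool:
--     """Return whether all label words occur close together in a token stream."""
--     if not label_tokens or len(label_tokens) < 2:
--         return False
--
--     positions: List[int] = []
--     for label_token in label_tokens:
--         try:
--             positions.append(text_tokens.index(label_token))
--         except ValueError:
--             return False
--
--     return max(positions) - min(positions) <= window
-- ===== SOURCE B (Python) =====
-- from typing import List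
--
-- def _words_within_window(text_tokens: List[str], label_tokens: List[str], window: int = 10) -> bool:
--     """Return whether all label words occur close together in a token stream."""
--     if len(label_tokens) < 2:
--         return False
--
--     remaining = set(label_tokens)
--     lo = None
--     for i, tok in enumerate(text_tokens):
--         if tok in remaining:
--             if lo is None:
--                 lo = i
--             remaining.discard(tok)
--             if not remaining:
--                 return i - lo <= window
--     return False
-- ===== Notes on version B (the rewrite author's own statement) =====
-- stated objective: alternative
-- what changed: B replaces A's per-label-token list.index scans plus a materialised positions list with max/min by a single left-to-right scan of text_tokens that shrinks a set of still-unseen label tokens, records the index of the first label hit, and returns as soon as the set empties (that index minus the first is exactly max-min of the first occurrences); fewer passes asymptotically (O(|text|+|label|) vs O(|label|*|text|)) but not measurably faster on the timed inputs.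
import Mathlib
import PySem

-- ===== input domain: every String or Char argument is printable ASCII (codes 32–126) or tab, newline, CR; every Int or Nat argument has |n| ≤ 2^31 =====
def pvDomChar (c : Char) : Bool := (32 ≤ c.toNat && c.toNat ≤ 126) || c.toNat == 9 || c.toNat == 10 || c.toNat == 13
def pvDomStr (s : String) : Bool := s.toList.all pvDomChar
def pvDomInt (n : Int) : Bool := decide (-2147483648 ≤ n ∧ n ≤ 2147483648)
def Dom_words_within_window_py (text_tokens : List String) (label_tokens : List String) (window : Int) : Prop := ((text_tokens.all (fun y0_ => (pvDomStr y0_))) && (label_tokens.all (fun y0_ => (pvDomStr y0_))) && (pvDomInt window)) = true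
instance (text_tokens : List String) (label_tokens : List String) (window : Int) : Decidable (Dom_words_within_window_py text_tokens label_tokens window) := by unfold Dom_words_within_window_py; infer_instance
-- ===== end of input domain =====

-- B drops A's per-label-token list.index scans (and the positions list with max/min):
-- it scans text_tokens once, shrinking a set of still-unseen label tokens, and returns
-- at the index where the set empties; objective: alternative single-scan algorithm.
-- ===== PORT A =====
-- A: collect text_tokens.index(t) for each label token (ValueError → return False),
-- then max(positions) - min(positions) <= window.
def pvCollectA (text_tokens : List String) : List String → List Int → Option (List Int)
  | [], acc => some acc
  | t :: rest, acc =>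
    match PySem.List.index? text_tokens t with
    | none => none
    | some i => pvCollectA text_tokens rest (acc ++ [(i : Int)])

def words_within_window_py (text_tokens : List String) (label_tokens : List String) (window : Int) : Bool :=
  if label_tokens.length < 2 then false   -- 'not label_tokens or len(label_tokens) < 2'
  else
    match pvCollectA text_tokens label_tokens [] with
    | none => false
    | some ps =>
      -- ps is nonempty here (label_tokens is); the catch-all branch is unreachable
      match PySem.List.max? ps (fun x => x), PySem.List.min? ps (fun x => x) with
      | some mx, some mn => decide (mx - mn ≤ window)
      | _, _ => false

-- ===== PORT B =====
-- B: one scan over text_tokens with a set of still-unseen label tokens; lo is the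
-- index of the first label hit; when the set empties at index i, answer i - lo ≤ window.
def pvScanB (window : Int) : List String → Int → PySem.Set String → Option Int → Bool
  | [], _, _, _ => false
  | tok :: rest, i, remaining, lo =>
    if PySem.Set.contains remaining tok then
      let lo' := lo.getD i
      let remaining' := PySem.Set.discard remaining tok
      if remaining'.isEmpty then decide (i - lo' ≤ window)
      else pvScanB window rest (i + 1) remaining' (some lo')
    else pvScanB window rest (i + 1) remaining lo

def words_within_window_py_alt (text_tokens : List String) (label_tokens : List String) (window : Int) : Bool :=
  if label_tokens.length < 2 then false
  else pvScanB window text_tokens 0 (PySem.Set.ofList label_tokens) none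

-- ===== PRECONDITION & SPEC =====
def Spec_words_within_window_py (text_tokens : List String) (label_tokens : List String) (window : Int) (out : Bool) : Prop := out = words_within_window_py_alt text_tokens label_tokens window
instance (text_tokens : List String) (label_tokens : List String) (window : Int) (out : Bool) : Decidable (Spec_words_within_window_py text_tokens label_tokens window out) := by unfold Spec_words_within_window_py; infer_instance

-- ===== CLAIM (what is proved, stated in full; the proofs are below) =====
def Claim_equal_words_within_window_py : Prop := ∀ (text_tokens : List String) (label_tokens : List String) (window : Int), Dom_words_within_window_py text_tokens label_tokens window → Spec_words_within_window_py text_tokens label_tokens window (words_within_window_py text_tokens label_tokens window)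

-- ===== LEMMAS AND PROOFS =====

-- first-occurrence indices (as Ints) of a token list in text, none if one is missing
def pvFirsts? (text : List String) : List String → Option (List Int)
  | [] => some []
  | t :: ts =>
    match PySem.List.index? text t, pvFirsts? text ts with
    | some k, some ks => some ((k : Int) :: ks)
    | _, _ => none

def pvMaxI : List Int → Int
  | [] => 0
  | x :: xs => xs.foldl max x

def pvMinI : List Int → Int
  | [] => 0
  | x :: xs => xs.foldl min x

theorem pvFoldlMax_mem : ∀ (xs : List Int) (a : Int), xs.foldl max a = a ∨ xs.foldl max a ∈ xs := by
  intro xs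
  induction xs with
  | nil => intro a; left; rfl
  | cons x xs ih =>
    intro a
    rcases ih (max a x) with h | h
    · rcases max_choice a x with hc | hc <;> rw [List.foldl_cons, h, hc]
      · left; rfl
      · right; simp
    · right; simp [h]

theorem pvLe_foldlMax_init : ∀ (xs : List Int) (a : Int), a ≤ xs.foldl max a := by
  intro xs
  induction xs with
  | nil => intro a; simp
  | cons x xs ih => intro a; exact le_trans (le_max_left a x) (ih (max a x))

theorem pvLe_foldlMax : ∀ (xs : List Int) (a y : Int), y ∈ xs → y ≤ xs.foldl max a := by
  intro xs
  induction xs with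
  | nil => intro a y h; simp at h
  | cons x xs ih =>
    intro a y h
    rcases List.mem_cons.mp h with rfl | h
    · exact le_trans (le_max_right a y) (pvLe_foldlMax_init xs (max a y))
    · exact ih (max a x) y h

theorem pvFoldlMin_mem : ∀ (xs : List Int) (a : Int), xs.foldl min a = a ∨ xs.foldl min a ∈ xs := by
  intro xs
  induction xs with
  | nil => intro a; left; rfl
  | cons x xs ih =>
    intro a
    rcases ih (min a x) with h | h
    · rcases min_choice a x with hc | hc <;> rw [List.foldl_cons, h, hc]
      · left; rfl
      · right; simp
    · right; simp [h]

theorem pvFoldlMin_le_init : ∀ (xs : List Int) (a : Int), xs.foldl min a ≤ a := by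
  intro xs
  induction xs with
  | nil => intro a; simp
  | cons x xs ih => intro a; exact le_trans (ih (min a x)) (min_le_left a x)

theorem pvFoldlMin_le : ∀ (xs : List Int) (a y : Int), y ∈ xs → xs.foldl min a ≤ y := by
  intro xs
  induction xs with
  | nil => intro a y h; simp at h
  | cons x xs ih =>
    intro a y h
    rcases List.mem_cons.mp h with rfl | h
    · exact le_trans (pvFoldlMin_le_init xs (min a y)) (min_le_right a y)
    · exact ih (min a x) y h

theorem pvMaxI_mem (ps : List Int) (h : ps ≠ []) : pvMaxI ps ∈ ps := by
  cases ps with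
  | nil => exact absurd rfl h
  | cons x xs =>
    rcases pvFoldlMax_mem xs x with h' | h'
    · simp [pvMaxI, h']
    · simp [pvMaxI, h']

theorem pvLe_maxI (ps : List Int) (y : Int) (h : y ∈ ps) : y ≤ pvMaxI ps := by
  cases ps with
  | nil => simp at h
  | cons x xs =>
    rcases List.mem_cons.mp h with rfl | h
    · exact pvLe_foldlMax_init xs y
    · exact pvLe_foldlMax xs x y h

theorem pvMinI_mem (ps : List Int) (h : ps ≠ []) : pvMinI ps ∈ ps := by
  cases ps with
  | nil => exact absurd rfl h
  | cons x xs =>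
    rcases pvFoldlMin_mem xs x with h' | h'
    · simp [pvMinI, h']
    · simp [pvMinI, h']

theorem pvMinI_le (ps : List Int) (y : Int) (h : y ∈ ps) : pvMinI ps ≤ y := by
  cases ps with
  | nil => simp at h
  | cons x xs =>
    rcases List.mem_cons.mp h with rfl | h
    · exact pvFoldlMin_le_init xs y
    · exact pvFoldlMin_le xs x y h

theorem pvMaxI_eq_of_memEq (ps qs : List Int) (hm : ∀ y, y ∈ ps ↔ y ∈ qs)
    (hp : ps ≠ []) (hq : qs ≠ []) : pvMaxI ps = pvMaxI qs :=
  le_antisymm (pvLe_maxI qs _ ((hm _).mp (pvMaxI_mem ps hp)))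
    (pvLe_maxI ps _ ((hm _).mpr (pvMaxI_mem qs hq)))

theorem pvMinI_eq_of_memEq (ps qs : List Int) (hm : ∀ y, y ∈ ps ↔ y ∈ qs)
    (hp : ps ≠ []) (hq : qs ≠ []) : pvMinI ps = pvMinI qs :=
  le_antisymm (pvMinI_le ps _ ((hm _).mpr (pvMinI_mem qs hq)))
    (pvMinI_le qs _ ((hm _).mp (pvMinI_mem ps hp)))

theorem pvFirsts?_none_iff (text : List String) : ∀ (ts : List String),
    pvFirsts? text ts = none ↔ ∃ t ∈ ts, PySem.List.index? text t = none := by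
  intro ts
  induction ts with
  | nil => simp [pvFirsts?]
  | cons t ts ih =>
    simp only [pvFirsts?]
    cases hk : PySem.List.index? text t with
    | none => exact iff_of_true rfl ⟨t, List.mem_cons_self .., hk⟩
    | some k =>
      cases hf : pvFirsts? text ts with
      | none =>
        rw [ih] at hf
        rcases hf with ⟨t', ht', hn⟩
        exact iff_of_true rfl ⟨t', List.mem_cons.mpr (Or.inr ht'), hn⟩
      | some ks =>
        refine iff_of_false (by simp) ?_
        rintro ⟨t', ht', hn⟩
        rcases List.mem_cons.mp ht' with rfl | ht'
        · rw [hk] at hn; cases hn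
        · have : pvFirsts? text ts = none := (ih).mpr ⟨t', ht', hn⟩
          rw [hf] at this; cases this

theorem pvFirsts?_some_length (text : List String) : ∀ (ts : List String) (ps : List Int),
    pvFirsts? text ts = some ps → ps.length = ts.length := by
  intro ts
  induction ts with
  | nil => intro ps h; simp [pvFirsts?] at h; simp [← h]
  | cons t ts ih =>
    intro ps h
    simp only [pvFirsts?] at h
    cases hk : PySem.List.index? text t with
    | none => rw [hk] at h; simp at h
    | some k =>
      cases hf : pvFirsts? text ts with
      | none => rw [hk, hf] at h; simp at h
      | some ks =>
        rw [hk, hf] at h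
        simp only [Option.some.injEq] at h
        simp [← h, ih ks hf]

theorem mem_pvFirsts? (text : List String) : ∀ (ts : List String) (ps : List Int),
    pvFirsts? text ts = some ps → ∀ (y : Int),
    (y ∈ ps ↔ ∃ t ∈ ts, ∃ k, PySem.List.index? text t = some k ∧ y = (k : Int)) := by
  intro ts
  induction ts with
  | nil =>
    intro ps h y
    simp only [pvFirsts?, Option.some.injEq] at h
    subst h; simp
  | cons t ts ih =>
    intro ps h y
    simp only [pvFirsts?] at h
    cases hk : PySem.List.index? text t with
    | none => rw [hk] at h; simp at h
    | some k =>
      cases hf : pvFirsts? text ts with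
      | none => rw [hk, hf] at h; simp at h
      | some ks =>
        rw [hk, hf] at h
        simp only [Option.some.injEq] at h
        subst h
        constructor
        · intro hy
          rcases List.mem_cons.mp hy with rfl | hy
          · exact ⟨t, List.mem_cons.mpr (Or.inl rfl), k, hk, rfl⟩
          · rcases (ih ks hf y).mp hy with ⟨t', ht', k', hk', rfl⟩
            exact ⟨t', by simp [ht'], k', hk', rfl⟩
        · rintro ⟨t', ht', k', hk', rfl⟩
          rcases List.mem_cons.mp ht' with rfl | ht'
          · rw [hk] at hk'
            injection hk' with hkk
            subst hkk
            exact List.mem_cons.mpr (Or.inl rfl)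
          · exact List.mem_cons.mpr (Or.inr ((ih ks hf _).mpr ⟨t', ht', k', hk', rfl⟩))

theorem pvFirsts?_shift (tok : String) (rest : List String) : ∀ (ts : List String),
    tok ∉ ts →
    pvFirsts? (tok :: rest) ts = (pvFirsts? rest ts).map (List.map (· + 1)) := by
  intro ts
  induction ts with
  | nil => intro _; simp [pvFirsts?]
  | cons t ts ih =>
    intro hnm
    have hne : tok ≠ t := fun h => hnm (h ▸ List.mem_cons.mpr (Or.inl rfl))
    have hts : tok ∉ ts := fun h => hnm (List.mem_cons.mpr (Or.inr h))
    simp only [pvFirsts?]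
    rw [PySem.List.index?_cons_of_ne rest hne, ih hts]
    cases hk : PySem.List.index? rest t with
    | none => simp
    | some k =>
      cases hf : pvFirsts? rest ts with
      | none => simp
      | some ks =>
        simp only [Option.map_some, Option.some.injEq, List.map_cons, List.cons.injEq]
        constructor
        · push_cast; ring
        · trivial

theorem pvFoldlMax_shift : ∀ (xs : List Int) (a : Int),
    (xs.map (· + 1)).foldl max (a + 1) = xs.foldl max a + 1 := by
  intro xs
  induction xs with
  | nil => intro a; rfl
  | cons x xs ih =>
    intro a
    simp only [List.map_cons, List.foldl_cons]
    rw [show max (a + 1) (x + 1) = max a x + 1 by rcases max_cases a x with ⟨h1, h2⟩ | ⟨h1, h2⟩ <;> omega]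
    exact ih (max a x)

theorem pvFoldlMin_shift : ∀ (xs : List Int) (a : Int),
    (xs.map (· + 1)).foldl min (a + 1) = xs.foldl min a + 1 := by
  intro xs
  induction xs with
  | nil => intro a; rfl
  | cons x xs ih =>
    intro a
    simp only [List.map_cons, List.foldl_cons]
    rw [show min (a + 1) (x + 1) = min a x + 1 by rcases min_cases a x with ⟨h1, h2⟩ | ⟨h1, h2⟩ <;> omega]
    exact ih (min a x)

theorem pvMaxI_shift (ps : List Int) (h : ps ≠ []) : pvMaxI (ps.map (· + 1)) = pvMaxI ps + 1 := by
  cases ps with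
  | nil => exact absurd rfl h
  | cons x xs => simpa [pvMaxI] using pvFoldlMax_shift xs x

theorem pvMinI_shift (ps : List Int) (h : ps ≠ []) : pvMinI (ps.map (· + 1)) = pvMinI ps + 1 := by
  cases ps with
  | nil => exact absurd rfl h
  | cons x xs => simpa [pvMinI] using pvFoldlMin_shift xs x

theorem pvCollectA_eq (text : List String) : ∀ (L : List String) (acc : List Int),
    pvCollectA text L acc = (pvFirsts? text L).map (acc ++ ·) := by
  intro L
  induction L with
  | nil => intro acc; simp [pvCollectA, pvFirsts?]
  | cons t L ih =>
    intro acc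
    simp only [pvCollectA, pvFirsts?]
    cases hk : PySem.List.index? text t with
    | none => rfl
    | some k =>
      cases hf : pvFirsts? text L with
      | none => simp [ih, hf]
      | some ks => simp [ih, hf]

-- every entry of a first-occurrence list is a nonnegative Nat cast
theorem pvFirsts?_nonneg (text : List String) (ts : List String) (ps : List Int)
    (h : pvFirsts? text ts = some ps) : ∀ y ∈ ps, 0 ≤ y := by
  intro y hy
  rcases (mem_pvFirsts? text ts ps h y).mp hy with ⟨t, _, k, _, rfl⟩
  exact Int.natCast_nonneg k

-- B's scan equals: all remaining tokens found, and (i + max first) - (lo, or i + min first) ≤ window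
theorem pvScanB_spec (window : Int) : ∀ (text : List String) (S : PySem.Set String)
    (i : Int) (lo : Option Int), S.Nodup → S ≠ [] →
    pvScanB window text i S lo =
      (match pvFirsts? text S with
       | none => false
       | some ps => decide ((i + pvMaxI ps) - lo.getD (i + pvMinI ps) ≤ window)) := by
  intro text
  induction text with
  | nil =>
    intro S i lo _ hS
    cases S with
    | nil => exact absurd rfl hS
    | cons t ts =>
      have hnone : pvFirsts? ([] : List String) (t :: ts) = none := by
        rw [pvFirsts?_none_iff]
        exact ⟨t, List.mem_cons.mpr (Or.inl rfl), by simp [PySem.List.index?]⟩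
      rw [hnone]
      rfl
  | cons tok rest ih =>
    intro S i lo hnd hS
    by_cases hmem : tok ∈ S
    · have hcont : PySem.Set.contains S tok = true := (PySem.Set.contains_iff S tok).mpr hmem
      by_cases hE : PySem.Set.discard S tok = []
      · -- the set empties at this index: S = [tok]
        have hall : ∀ y ∈ S, y = tok := by
          intro y hy
          by_contra hne
          have : y ∈ PySem.Set.discard S tok := (PySem.Set.mem_discard S tok y).mpr ⟨hy, hne⟩
          rw [hE] at this
          simp at this
        have hSe : S = [tok] := by
          cases S with
          | nil => exact absurd rfl hS
          | cons a as =>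
            have ha : a = tok := hall a (List.mem_cons.mpr (Or.inl rfl))
            subst ha
            cases as with
            | nil => rfl
            | cons b bs =>
              have hb : b = a := hall b (by simp)
              subst hb
              simp at hnd
        subst hSe
        have hfst : pvFirsts? (tok :: rest) [tok] = some [(0 : Int)] := by
          simp only [pvFirsts?]
          rw [PySem.List.index?_cons_self]
          rfl
        simp only [pvScanB, hcont, if_pos, hE, List.isEmpty_nil]
        rw [hfst]
        simp only [pvMaxI, pvMinI, List.foldl_nil, add_zero]
      · -- recurse with the shrunken set
        have hnd' : (PySem.Set.discard S tok).Nodup := PySem.Set.nodup_discard S tok hnd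
        have hrec := ih (PySem.Set.discard S tok) (i + 1) (some (lo.getD i)) hnd' hE
        have hLHS : pvScanB window (tok :: rest) i S lo
            = pvScanB window rest (i + 1) (PySem.Set.discard S tok) (some (lo.getD i)) := by
          simp only [pvScanB, hcont, if_pos]
          rw [if_neg (by simpa [List.isEmpty_iff] using hE)]
        rw [hLHS, hrec]
        -- missing-token equivalence between the two sides
        have hnone : pvFirsts? (tok :: rest) S = none ↔ pvFirsts? rest (PySem.Set.discard S tok) = none := by
          rw [pvFirsts?_none_iff, pvFirsts?_none_iff]
          constructor
          · rintro ⟨t, ht, hn⟩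
            have hne : tok ≠ t := by
              rintro rfl
              rw [PySem.List.index?_cons_self] at hn
              cases hn
            rw [PySem.List.index?_cons_of_ne rest hne] at hn
            exact ⟨t, (PySem.Set.mem_discard S tok t).mpr ⟨ht, fun h => hne h.symm⟩,
              by simpa using hn⟩
          · rintro ⟨t, ht, hn⟩
            rcases (PySem.Set.mem_discard S tok t).mp ht with ⟨htS, htne⟩
            refine ⟨t, htS, ?_⟩
            rw [PySem.List.index?_cons_of_ne rest (fun h => htne h.symm), hn]
            rfl
        cases hf' : pvFirsts? rest (PySem.Set.discard S tok) with
        | none =>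
          rw [hnone.mpr hf']
        | some ps' =>
          have hps' : ps' ≠ [] := by
            intro h
            have := pvFirsts?_some_length rest _ _ hf'
            rw [h] at this
            exact hE (List.eq_nil_of_length_eq_zero this.symm)
          cases hf : pvFirsts? (tok :: rest) S with
          | none =>
            rw [hnone.mp hf] at hf'
            cases hf'
          | some ps =>
            have hps : ps ≠ [] := by
              intro h
              have := pvFirsts?_some_length (tok :: rest) _ _ hf
              rw [h] at this
              exact hS (List.eq_nil_of_length_eq_zero this.symm)
            -- membership of ps in terms of ps'
            have hmemps : ∀ y : Int, y ∈ ps ↔ (y = 0 ∨ ∃ z ∈ ps', y = z + 1) := by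
              intro y
              rw [mem_pvFirsts? _ _ _ hf]
              constructor
              · rintro ⟨t, ht, k, hk, rfl⟩
                by_cases hte : t = tok
                · subst hte
                  rw [PySem.List.index?_cons_self] at hk
                  injection hk with h
                  subst h
                  exact Or.inl rfl
                · right
                  rw [PySem.List.index?_cons_of_ne rest (fun h => hte h.symm)] at hk
                  cases hkr : PySem.List.index? rest t with
                  | none => rw [hkr] at hk; cases hk
                  | some k' =>
                    rw [hkr] at hk
                    injection hk with h
                    subst h
                    refine ⟨(k' : Int), ?_, by push_cast; ring⟩
                    exact (mem_pvFirsts? rest _ ps' hf' _).mpr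
                      ⟨t, (PySem.Set.mem_discard S tok t).mpr ⟨ht, hte⟩, k', hkr, rfl⟩
              · rintro (rfl | ⟨z, hz, rfl⟩)
                · exact ⟨tok, hmem, 0, PySem.List.index?_cons_self .., by simp⟩
                · rcases (mem_pvFirsts? rest _ ps' hf' z).mp hz with ⟨t, ht, k, hk, rfl⟩
                  rcases (PySem.Set.mem_discard S tok t).mp ht with ⟨htS, htne⟩
                  refine ⟨t, htS, k + 1, ?_, by push_cast; ring⟩
                  rw [PySem.List.index?_cons_of_ne rest (fun h => htne h.symm), hk]
                  rfl
            have hnn' : ∀ z ∈ ps', (0 : Int) ≤ z := pvFirsts?_nonneg rest _ ps' hf'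
            have h0 : (0 : Int) ∈ ps := (hmemps 0).mpr (Or.inl rfl)
            have hmin : pvMinI ps = 0 := by
              refine le_antisymm (pvMinI_le ps 0 h0) ?_
              rcases (hmemps _).mp (pvMinI_mem ps hps) with h | ⟨z, hz, h⟩
              · omega
              · have := hnn' z hz
                omega
            have hmax : pvMaxI ps = pvMaxI ps' + 1 := by
              refine le_antisymm ?_ ?_
              · rcases (hmemps _).mp (pvMaxI_mem ps hps) with h | ⟨z, hz, h⟩
                · have := hnn' _ (pvMaxI_mem ps' hps')
                  omega
                · have := pvLe_maxI ps' z hz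
                  omega
              · exact pvLe_maxI ps _ ((hmemps _).mpr (Or.inr ⟨pvMaxI ps', pvMaxI_mem ps' hps', rfl⟩))
            show decide (i + 1 + pvMaxI ps' - (some (lo.getD i)).getD (i + 1 + pvMinI ps') ≤ window)
                = decide (i + pvMaxI ps - lo.getD (i + pvMinI ps) ≤ window)
            rw [hmax, hmin]
            cases lo with
            | none =>
              simp only [Option.getD_none, Option.getD_some]
              congr 1
              rw [eq_iff_iff]
              constructor <;> intro <;> omega
            | some l =>
              simp only [Option.getD_some]
              congr 1
              rw [eq_iff_iff]
              constructor <;> intro <;> omega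
    · -- head token is not a label token: pure shift
      have hcont : PySem.Set.contains S tok = false := by
        cases h : PySem.Set.contains S tok
        · rfl
        · exact absurd ((PySem.Set.contains_iff S tok).mp h) hmem
      have hLHS : pvScanB window (tok :: rest) i S lo = pvScanB window rest (i + 1) S lo := by
        simp only [pvScanB, hcont]
        rfl
      rw [hLHS, ih S (i + 1) lo hnd hS, pvFirsts?_shift tok rest S hmem]
      cases hf : pvFirsts? rest S with
      | none => rfl
      | some ps =>
        have hps : ps ≠ [] := by
          intro h
          have := pvFirsts?_some_length rest _ _ hf
          rw [h] at this
          exact hS (List.eq_nil_of_length_eq_zero this.symm)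
        simp only [Option.map_some]
        show decide (i + 1 + pvMaxI ps - lo.getD (i + 1 + pvMinI ps) ≤ window)
            = decide (i + pvMaxI (ps.map (· + 1)) - lo.getD (i + pvMinI (ps.map (· + 1))) ≤ window)
        rw [pvMaxI_shift ps hps, pvMinI_shift ps hps]
        cases lo with
        | none =>
          simp only [Option.getD_none]
          congr 1
          rw [eq_iff_iff]
          constructor <;> intro <;> omega
        | some l =>
          simp only [Option.getD_some]
          congr 1
          rw [eq_iff_iff]
          constructor <;> intro <;> omega

-- ===== VERDICT (by name: the statement is the Claim_ definition above) =====
theorem words_within_window_py_spec : Claim_equal_words_within_window_py := by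
  intro text label window _
  unfold Spec_words_within_window_py words_within_window_py words_within_window_py_alt
  by_cases hlen : label.length < 2
  · simp [hlen]
  · simp only [hlen, if_false]
    have hlabne : label ≠ [] := by
      intro h
      subst h
      simp at hlen
    have hSnd : (PySem.Set.ofList label).Nodup := PySem.Set.nodup_ofList label
    have hSne : (PySem.Set.ofList label) ≠ [] := by
      cases label with
      | nil => exact absurd rfl hlabne
      | cons a as =>
        intro h
        have : a ∈ PySem.Set.ofList (a :: as) := (PySem.Set.mem_ofList (a :: as) a).mpr (List.mem_cons.mpr (Or.inl rfl))
        rw [h] at this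
        simp at this
    rw [pvCollectA_eq, pvScanB_spec window text (PySem.Set.ofList label) 0 none hSnd hSne]
    cases hfL : pvFirsts? text label with
    | none =>
      have hfS : pvFirsts? text (PySem.Set.ofList label) = none := by
        rw [pvFirsts?_none_iff] at hfL ⊢
        rcases hfL with ⟨t, ht, hn⟩
        exact ⟨t, (PySem.Set.mem_ofList label t).mpr ht, hn⟩
      rw [hfS]
      rfl
    | some ps =>
      have hfS : ∃ qs, pvFirsts? text (PySem.Set.ofList label) = some qs := by
        cases h : pvFirsts? text (PySem.Set.ofList label) with
        | none =>
          rw [pvFirsts?_none_iff] at h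
          rcases h with ⟨t, ht, hn⟩
          have : pvFirsts? text label = none :=
            (pvFirsts?_none_iff text label).mpr ⟨t, (PySem.Set.mem_ofList label t).mp ht, hn⟩
          rw [hfL] at this
          cases this
        | some qs => exact ⟨qs, rfl⟩
      obtain ⟨qs, hfS⟩ := hfS
      rw [hfS]
      have hps : ps ≠ [] := by
        intro h
        have := pvFirsts?_some_length text _ _ hfL
        rw [h] at this
        exact hlabne (List.eq_nil_of_length_eq_zero this.symm)
      have hqs : qs ≠ [] := by
        intro h
        have := pvFirsts?_some_length text _ _ hfS
        rw [h] at this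
        exact hSne (List.eq_nil_of_length_eq_zero this.symm)
      have hmemEq : ∀ y, y ∈ ps ↔ y ∈ qs := by
        intro y
        rw [mem_pvFirsts? text label ps hfL y, mem_pvFirsts? text _ qs hfS y]
        constructor
        · rintro ⟨t, ht, k, hk, rfl⟩
          exact ⟨t, (PySem.Set.mem_ofList label t).mpr ht, k, hk, rfl⟩
        · rintro ⟨t, ht, k, hk, rfl⟩
          exact ⟨t, (PySem.Set.mem_ofList label t).mp ht, k, hk, rfl⟩
      have hmax := pvMaxI_eq_of_memEq ps qs hmemEq hps hqs
      have hmin := pvMinI_eq_of_memEq ps qs hmemEq hps hqs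
      cases ps with
      | nil => exact absurd rfl hps
      | cons x xs =>
        simp only [Option.map_some, List.nil_append, PySem.List.max?_id_cons, PySem.List.min?_id_cons]
        have hx : xs.foldl max x = pvMaxI (x :: xs) := rfl
        have hn : xs.foldl min x = pvMinI (x :: xs) := rfl
        rw [hx, hn, hmax, hmin]
        simp only [Option.getD_none]
        congr 1
        rw [eq_iff_iff]
        constructor <;> intro <;> omega
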